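-- pv_equiv track=rewrite | github.com/joyshmitz/frankenmermaid | scripts/cloudflare_pages_ops.py | render_headers_manifest
-- ===== SOURCE A (Python) =====
-- HEADER_ROUTE_ORDER = (
--     "/web",
--     "/web/*",
--     "/web_react",
--     "/web_react/*",
--     "/pkg/*",
--     "/evidence/*",
-- )
--
-- def render_headers_manifest(rules: dict[str, dict[str, str]]) -> str:
--     ordered_routes = list(HEADER_ROUTE_ORDER)
--     ordered_routes.extend(sorted(route for route in rules if route not in HEADER_ROUTE_ORDER))
--     blocks: list[str] = []
--     for route in ordered_routes:
--         if route not in rules: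
--             continue
--         blocks.append(route)
--         for header_name, value in sorted(rules[route].items()):
--             rendered_name = "-".join(part.capitalize() for part in header_name.split("-"))
--             blocks.append(f"  {rendered_name}: {value}")
--         blocks.append("")
--     return "\n".join(blocks).rstrip() + "\n"
-- ===== SOURCE B (Python) =====
-- HEADER_ROUTE_ORDER = (
--     "/web",
--     "/web/*",
--     "/web_react",
--     "/web_react/*",
--     "/pkg/*",
--     "/evidence/*",
-- )
--
--
-- def _cap(name: str) -> str:
--     # single character scan: uppercase at the start of each '-'-separated part,
--     # lowercase elsewhere (equals "-".join(p.capitalize() ...) on ASCII)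
--     out = []
--     start = True
--     for ch in name:
--         out.append(ch.upper() if start else ch.lower())
--         start = ch == "-"
--     return "".join(out)
--
--
-- def render_headers_manifest(rules: dict) -> str:
--     pos = {route: i for i, route in enumerate(HEADER_ROUTE_ORDER)}
--     n = len(HEADER_ROUTE_ORDER)
--     text = ""
--     for route in sorted(rules, key=lambda r: (pos.get(r, n), r)):
--         text += route
--         for name, value in sorted(rules[route].items()):
--             text += "\n  " + _cap(name) + ": " + value
--         text += "\n\n"
--     return text.rstrip() + "\n"
-- ===== Notes on version B (the rewrite author's own statement) =====
-- stated objective: alternative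
-- what changed: B replaces A's fixed-candidate-list-then-skip scan by one keyed sort of the dict's keys over a position-index dict, streams the output through a single string accumulator instead of collecting a line list joined at the end, and capitalizes header names by a single character scan instead of split/capitalize/join.
import Mathlib
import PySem

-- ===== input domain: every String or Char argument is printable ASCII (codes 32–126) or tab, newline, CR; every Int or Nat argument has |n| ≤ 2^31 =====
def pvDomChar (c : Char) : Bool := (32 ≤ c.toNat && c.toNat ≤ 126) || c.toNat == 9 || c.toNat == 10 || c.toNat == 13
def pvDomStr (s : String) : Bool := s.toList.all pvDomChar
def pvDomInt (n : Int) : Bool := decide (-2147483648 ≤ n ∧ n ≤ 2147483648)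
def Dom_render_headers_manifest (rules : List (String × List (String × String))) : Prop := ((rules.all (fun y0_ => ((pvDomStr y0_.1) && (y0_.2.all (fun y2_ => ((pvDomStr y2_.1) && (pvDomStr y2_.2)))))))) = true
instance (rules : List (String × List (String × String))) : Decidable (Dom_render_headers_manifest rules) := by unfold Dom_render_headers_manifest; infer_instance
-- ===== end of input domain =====

-- B replaces A's candidate-order-then-skip scan by ONE keyed sort of the dict's keys over a
-- position-index dict, streams the text through a single string accumulator instead of a list of
-- lines joined at the end, and capitalizes header names by a single character scan instead of
-- split/capitalize/join (objective: alternative, same cost).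
-- dicts are represented as association lists (first binding wins); pvDictKeys/pvDictGet/pvDictItems decode that representation for both ports.

def HEADER_ROUTE_ORDER : List String :=
  ["/web", "/web/*", "/web_react", "/web_react/*", "/pkg/*", "/evidence/*"]

-- str.capitalize(): first char uppercased, rest lowered (exact on ASCII)
def pvCapitalize : List Char → List Char
  | [] => []
  | c :: rest => PySem.Chars.upperChar c :: PySem.Chars.lower rest

-- the dict's keys in insertion order (ordered dedup, first binding wins)
def pvDictKeys (rules : List (String × List (String × String))) : List String :=
  PySem.List.dedup (rules.map (·.1))

-- dict lookup: first matching binding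
def pvDictGet (rules : List (String × List (String × String))) (k : String) : List (String × String) :=
  ((rules.find? (fun p => p.1 == k)).map (·.2)).getD []

-- dict.items() of an inner header dict given as an association list (first binding wins)
def pvDictItems (hs : List (String × String)) : List (String × String) :=
  (PySem.List.dedup (hs.map (·.1))).map
    (fun n => (n, ((hs.find? (fun p => p.1 == n)).map (·.2)).getD ""))

-- ===== PORT A =====
def render_headers_manifest (rules : List (String × List (String × String))) : String :=
  let ordered_routes : List String :=
    HEADER_ROUTE_ORDER ++
      PySem.List.sorted ((pvDictKeys rules).filter (fun r => !HEADER_ROUTE_ORDER.contains r)) (fun r => r)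
  let blocks : List (List Char) :=
    ordered_routes.foldl
      (fun blocks route =>
        if !(pvDictKeys rules).contains route then blocks
        else
          (PySem.List.sorted2 (pvDictItems (pvDictGet rules route)) (fun p => p.1) (fun p => p.2)).foldl
            (fun blocks hv =>
              let rendered_name :=
                PySem.Chars.join ['-'] ((PySem.Chars.splitOn hv.1.toList ['-']).map pvCapitalize)
              blocks ++ [' ' :: ' ' :: (rendered_name ++ ':' :: ' ' :: hv.2.toList)])
            (blocks ++ [route.toList]) ++ [[]])
      []
  String.ofList (PySem.Chars.rstrip (PySem.Chars.join ['\n'] blocks) ++ ['\n'])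

-- ===== PORT B =====
-- Source B's _cap: single scan, uppercase at the start of each '-'-separated part, lowercase elsewhere
def pvCapScan : List Char → Bool → List Char
  | [], _ => []
  | c :: rest, start =>
    (if start then PySem.Chars.upperChar c else PySem.Chars.lowerChar c) :: pvCapScan rest (c == '-')

def render_headers_manifest_alt (rules : List (String × List (String × String))) : String :=
  let pos : PySem.Dict String Int :=
    (PySem.List.enumerate HEADER_ROUTE_ORDER 0).foldl
      (fun d p => PySem.Dict.insert d p.2 p.1) PySem.Dict.empty
  let n : Int := (HEADER_ROUTE_ORDER.length : Int)
  let text : List Char :=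
    (PySem.List.sorted2 (pvDictKeys rules) (fun r => PySem.Dict.getD pos r n) (fun r => r)).foldl
      (fun text route =>
        let text := text ++ route.toList
        let text :=
          (PySem.List.sorted2 (pvDictItems (pvDictGet rules route)) (fun p => p.1) (fun p => p.2)).foldl
            (fun text nv =>
              text ++ ('\n' :: ' ' :: ' ' :: (pvCapScan nv.1.toList true ++ ':' :: ' ' :: nv.2.toList)))
            text
        text ++ ['\n', '\n'])
      []
  String.ofList (PySem.Chars.rstrip text ++ ['\n'])

-- ===== PRECONDITION & SPEC =====
def Spec_render_headers_manifest (rules : List (String × List (String × String))) (out : String) : Prop := out = render_headers_manifest_alt rules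
instance (rules : List (String × List (String × String))) (out : String) : Decidable (Spec_render_headers_manifest rules out) := by unfold Spec_render_headers_manifest; infer_instance

-- ===== CLAIM (what is proved, stated in full; the proofs are below) =====
def Claim_equal_render_headers_manifest : Prop := ∀ (rules : List (String × List (String × String))), Dom_render_headers_manifest rules → Spec_render_headers_manifest rules (render_headers_manifest rules)

-- ===== LEMMAS AND PROOFS =====

-- ---- capitalization: A's split/capitalize/join = B's character scan ----

-- structural split on '-' (proof-only characterization of PySem.Chars.splitOn cs ['-'])
def split1 : List Char → List (List Char)
  | [] => [[]]
  | c :: rest =>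
    if c = '-' then [] :: split1 rest
    else match split1 rest with
      | [] => [[c]]
      | p :: ps => (c :: p) :: ps

theorem split1_ne_nil (cs : List Char) : split1 cs ≠ [] := by
  induction cs with
  | nil => simp [split1]
  | cons c rest ih =>
    simp only [split1]
    split
    · simp
    · split <;> simp

theorem go_eq_split1 (l : List Char) : ∀ (n : Nat) (cur : List Char) (acc : List (List Char)),
    l.length ≤ n →
    PySem.Chars.splitOn.go ['-'] (n + 1) l cur acc
      = acc.reverse ++ (match split1 l with | [] => [] | p :: ps => (cur.reverse ++ p) :: ps) := by
  induction l with
  | nil =>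
    intro n cur acc _
    simp [PySem.Chars.splitOn.go, split1]
  | cons c rest ih =>
    intro n cur acc hlen
    cases n with
    | zero => simp at hlen
    | succ m =>
      rw [PySem.Chars.splitOn.go]
      by_cases hc : c = '-'
      · subst hc
        rw [if_pos (by simp [List.isPrefixOf])]
        obtain ⟨p, ps, hps⟩ : ∃ p ps, split1 rest = p :: ps := by
          cases h : split1 rest with
          | nil => exact absurd h (split1_ne_nil rest)
          | cons p ps => exact ⟨p, ps, rfl⟩
        have := ih m [] (cur.reverse :: acc) (by simpa using Nat.le_of_succ_le_succ (by simpa using hlen))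
        simp only [List.drop, List.length_singleton] at this ⊢
        rw [this, hps]
        simp [split1, hps]
      · rw [if_neg (by simp [List.isPrefixOf, Ne.symm hc])]
        obtain ⟨p, ps, hps⟩ : ∃ p ps, split1 rest = p :: ps := by
          cases h : split1 rest with
          | nil => exact absurd h (split1_ne_nil rest)
          | cons p ps => exact ⟨p, ps, rfl⟩
        have := ih m (c :: cur) acc (by simpa using Nat.le_of_succ_le_succ (by simpa using hlen))
        rw [this, hps]
        simp [split1, hps, hc]

theorem splitOn_eq_split1 (cs : List Char) : PySem.Chars.splitOn cs ['-'] = split1 cs := by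
  unfold PySem.Chars.splitOn
  rw [go_eq_split1 cs cs.length [] [] le_rfl]
  obtain ⟨p, ps, hps⟩ : ∃ p ps, split1 cs = p :: ps := by
    cases h : split1 cs with
    | nil => exact absurd h (split1_ne_nil cs)
    | cons p ps => exact ⟨p, ps, rfl⟩
  rw [hps]; simp

theorem join_sep_cons (sep : List Char) (a : List Char) (rest : List (List Char)) :
    PySem.Chars.join sep (a :: rest) = a ++ (rest.map (fun q => sep ++ q)).flatten := by
  induction rest generalizing a with
  | nil => simp [PySem.Chars.join_singleton]
  | cons b t ih => rw [PySem.Chars.join_cons_cons, ih b]; simp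

theorem cap_join_eq_scan (cs : List Char) :
    (match split1 cs with
      | [] => []
      | p :: ps => pvCapitalize p ++ (ps.map (fun q => '-' :: pvCapitalize q)).flatten)
      = pvCapScan cs true ∧
    (match split1 cs with
      | [] => []
      | p :: ps => PySem.Chars.lower p ++ (ps.map (fun q => '-' :: pvCapitalize q)).flatten)
      = pvCapScan cs false := by
  induction cs with
  | nil => constructor <;> simp [split1, pvCapitalize, pvCapScan, PySem.Chars.lower]
  | cons c rest ih =>
    obtain ⟨p, ps, hps⟩ : ∃ p ps, split1 rest = p :: ps := by
      cases h : split1 rest with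
      | nil => exact absurd h (split1_ne_nil rest)
      | cons p ps => exact ⟨p, ps, rfl⟩
    rw [hps] at ih
    by_cases hc : c = '-'
    · subst hc
      have hu : PySem.Chars.upperChar '-' = '-' := by decide
      have hl : PySem.Chars.lowerChar '-' = '-' := by decide
      simp only [split1, hps, pvCapScan, hu, hl, beq_self_eq_true, if_true,
        PySem.Chars.lower, List.map_cons, List.flatten_cons, List.nil_append]
      constructor
      · rw [← ih.1]
        simp [pvCapitalize, PySem.Chars.lower]
      · rw [← ih.1]
        simp [pvCapitalize, PySem.Chars.lower]
    · have hb : (c == '-') = false := by simpa using hc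
      simp only [split1, if_neg hc, hps, pvCapScan, hb,
        pvCapitalize, PySem.Chars.lower, List.map_cons]
      constructor
      · rw [← ih.2]
        simp [pvCapitalize, PySem.Chars.lower]
      · rw [← ih.2]
        simp [pvCapitalize, PySem.Chars.lower]

theorem pretty_eq_scan (cs : List Char) :
    PySem.Chars.join ['-'] ((PySem.Chars.splitOn cs ['-']).map pvCapitalize)
      = pvCapScan cs true := by
  rw [splitOn_eq_split1]
  obtain ⟨p, ps, hps⟩ : ∃ p ps, split1 cs = p :: ps := by
    cases h : split1 cs with
    | nil => exact absurd h (split1_ne_nil cs)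
    | cons p ps => exact ⟨p, ps, rfl⟩
  rw [hps, List.map_cons, join_sep_cons, ← cap_join_eq_scan cs |>.1, hps]
  simp [List.map_map, Function.comp_def]

-- ---- route order: B's one keyed sort = A's candidate list filtered to the present routes ----

-- the literal position-index dict Source B builds
theorem pos_eq_lit :
    (PySem.List.enumerate HEADER_ROUTE_ORDER 0).foldl
        (fun d p => PySem.Dict.insert d p.2 p.1) PySem.Dict.empty
      = PySem.Dict.mk [("/web", 0), ("/web/*", 1), ("/web_react", 2), ("/web_react/*", 3),
          ("/pkg/*", 4), ("/evidence/*", 5)] := by decide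

def pvRank (r : String) : Int :=
  PySem.Dict.getD
    ((PySem.List.enumerate HEADER_ROUTE_ORDER 0).foldl
      (fun d p => PySem.Dict.insert d p.2 p.1) PySem.Dict.empty) r 6

theorem rank_of_not_mem (r : String) (h : r ∉ HEADER_ROUTE_ORDER) : pvRank r = 6 := by
  simp only [HEADER_ROUTE_ORDER, List.mem_cons, not_or] at h
  obtain ⟨h1, h2, h3, h4, h5, h6, -⟩ := h
  rw [pvRank, pos_eq_lit]
  simp [PySem.Dict.getD_eq_get?_getD, PySem.Dict.get?_mk_cons, beq_iff_eq,
    Ne.symm h1, Ne.symm h2, Ne.symm h3, Ne.symm h4, Ne.symm h5, Ne.symm h6]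
  rfl

theorem sorted2_eq_sorted_lex {α κ₁ κ₂ : Type} [LinearOrder κ₁] [LinearOrder κ₂]
    (xs : List α) (k1 : α → κ₁) (k2 : α → κ₂) :
    PySem.List.sorted2 xs k1 k2
      = PySem.List.sorted xs (fun x => (toLex (k1 x, k2 x) : Lex (κ₁ × κ₂))) := by
  unfold PySem.List.sorted2 PySem.List.sorted
  simp only [if_neg (by decide : ¬ (false = true))]
  congr 1
  funext acc x
  congr 1
  funext a b
  rcases lt_trichotomy (k1 a) (k1 b) with h | h | h
  · simp [Prod.Lex.lt_iff, h]
  · simp [Prod.Lex.lt_iff, h]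
  · simp [Prod.Lex.lt_iff, h, not_lt_of_gt h, ne_of_gt h]

-- the key Source B sorts by, packed into one lexicographic value
def pvKey (r : String) : Lex (Int × String) := toLex (pvRank r, r)

theorem order_eq (keys : List String) (hnd : keys.Nodup) :
    PySem.List.sorted keys (fun r => pvKey r)
      = HEADER_ROUTE_ORDER.filter (fun r => keys.contains r) ++
        PySem.List.sorted (keys.filter (fun r => !HEADER_ROUTE_ORDER.contains r)) (fun r => r) := by
  apply PySem.List.sorted_eq_of_perm_of_pairwise_lt
  · -- permutation
    have hperm2 : (PySem.List.sorted (keys.filter (fun r => !HEADER_ROUTE_ORDER.contains r))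
        (fun r => r)).Perm (keys.filter (fun r => !HEADER_ROUTE_ORDER.contains r)) :=
      PySem.List.sorted_perm _ _ _
    have hperm1 : (HEADER_ROUTE_ORDER.filter (fun r => keys.contains r)).Perm
        (keys.filter (fun r => HEADER_ROUTE_ORDER.contains r)) := by
      rw [List.perm_ext_iff_of_nodup
        ((by decide : HEADER_ROUTE_ORDER.Nodup).filter _) (hnd.filter _)]
      intro a
      simp only [List.mem_filter, List.contains_eq_mem, decide_eq_true_eq]
      exact ⟨fun ⟨x, y⟩ => ⟨y, x⟩, fun ⟨x, y⟩ => ⟨y, x⟩⟩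
    exact (hperm1.append hperm2).trans (List.filter_append_perm _ keys)
  · -- strictly increasing under pvKey
    rw [List.pairwise_append]
    refine ⟨?_, ?_, ?_⟩
    · exact List.Pairwise.filter _
        (by decide :
          List.Pairwise (fun a b => pvKey a < pvKey b) HEADER_ROUTE_ORDER)
    · have hle := PySem.List.sorted_pairwise
        (keys.filter (fun r => !HEADER_ROUTE_ORDER.contains r)) (fun r => r)
      have hnd' : (PySem.List.sorted (keys.filter (fun r => !HEADER_ROUTE_ORDER.contains r))
          (fun r => r)).Nodup :=
        (PySem.List.sorted_perm _ _ _).nodup_iff.mpr (hnd.filter _)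
      have hmem : ∀ x, x ∈ PySem.List.sorted (keys.filter (fun r => !HEADER_ROUTE_ORDER.contains r))
          (fun r => r) → x ∈ keys.filter (fun r => !HEADER_ROUTE_ORDER.contains r) := by
        intro x hx
        exact (PySem.List.mem_sorted _ _ _ _).mp hx
      have hlt := hle.and hnd'
      refine hlt.imp_of_mem ?_
      intro a b ha hb ⟨hab, hne⟩
      have ha' : a ∉ HEADER_ROUTE_ORDER := by
        have := List.of_mem_filter (hmem a ha); simpa using this
      have hb' : b ∉ HEADER_ROUTE_ORDER := by
        have := List.of_mem_filter (hmem b hb); simpa using this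
      rw [pvKey, pvKey, rank_of_not_mem a ha', rank_of_not_mem b hb', Prod.Lex.lt_iff]
      exact Or.inr ⟨rfl, lt_of_le_of_ne hab hne⟩
    · intro a ha b hb
      have ha' : a ∈ HEADER_ROUTE_ORDER := List.mem_of_mem_filter ha
      have hb' : b ∉ HEADER_ROUTE_ORDER := by
        have := List.of_mem_filter ((PySem.List.mem_sorted _ _ _ _).mp hb)
        simpa using this
      rw [pvKey, pvKey, rank_of_not_mem b hb', Prod.Lex.lt_iff]
      left
      have : pvRank a < 6 := by
        revert ha'
        have : ∀ r ∈ HEADER_ROUTE_ORDER, pvRank r < 6 := by decide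
        exact this a
      simpa using this

-- ---- rendering: B's streamed text = A's '\n'-joined line list, up to the final rstrip ----

-- the per-route lines of A's rendering
def pvLines (rules : List (String × List (String × String))) (route : String) : List (List Char) :=
  route.toList ::
    (PySem.List.sorted2 (pvDictItems (pvDictGet rules route)) (fun p => p.1) (fun p => p.2)).map
      (fun hv => ' ' :: ' ' :: (PySem.Chars.join ['-']
        ((PySem.Chars.splitOn hv.1.toList ['-']).map pvCapitalize) ++ ':' :: ' ' :: hv.2.toList))

-- the per-route chunk of B's streamed text
def pvChunk (rules : List (String × List (String × String))) (route : String) : List Char :=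
  route.toList ++
    ((PySem.List.sorted2 (pvDictItems (pvDictGet rules route)) (fun p => p.1) (fun p => p.2)).map
      (fun nv => '\n' :: ' ' :: ' ' :: (pvCapScan nv.1.toList true ++ ':' :: ' ' :: nv.2.toList))).flatten
    ++ ['\n', '\n']

theorem chunk_eq_join_lines (rules : List (String × List (String × String))) (route : String) :
    pvChunk rules route = PySem.Chars.join ['\n'] (pvLines rules route) ++ ['\n', '\n'] := by
  rw [pvChunk, pvLines, join_sep_cons]
  have hf : (fun nv : String × String =>
        '\n' :: ' ' :: ' ' :: (pvCapScan nv.1.toList true ++ ':' :: ' ' :: nv.2.toList))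
      = ((fun q => ['\n'] ++ q) ∘ fun hv : String × String =>
        ' ' :: ' ' :: (PySem.Chars.join ['-']
          ((PySem.Chars.splitOn hv.1.toList ['-']).map pvCapitalize) ++ ':' :: ' ' :: hv.2.toList)) := by
    funext hv
    simp [pretty_eq_scan]
  rw [hf, ← List.map_map]

theorem pv_rstrip_newline (xs : List Char) :
    PySem.Chars.rstrip (xs ++ ['\n']) = PySem.Chars.rstrip xs := by
  have h : PySem.Chars.isspace '\n' = true := by decide
  simp [PySem.Chars.rstrip, h]

theorem pv_join_append (sep : List Char) (xs ys : List (List Char))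
    (hx : xs ≠ []) (hy : ys ≠ []) :
    PySem.Chars.join sep (xs ++ ys) = PySem.Chars.join sep xs ++ sep ++ PySem.Chars.join sep ys := by
  induction xs with
  | nil => exact absurd rfl hx
  | cons a t ih =>
    cases t with
    | nil =>
      cases ys with
      | nil => exact absurd rfl hy
      | cons b u => simp [PySem.Chars.join_cons_cons, PySem.Chars.join_singleton]
    | cons a' t' =>
      have := ih (by simp)
      simp only [List.cons_append, PySem.Chars.join_cons_cons] at *
      simp [this]

-- B's flattened chunks = A's joined line list plus one trailing '\n' (nonempty route list)
theorem chunks_eq_joined (rules : List (String × List (String × String)))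
    (rs : List String) (hne : rs ≠ []) :
    (rs.map (pvChunk rules)).flatten
      = PySem.Chars.join ['\n'] (rs.flatMap (fun r => pvLines rules r ++ [[]])) ++ ['\n'] := by
  induction rs with
  | nil => exact absurd rfl hne
  | cons r t ih =>
    have hlr : pvLines rules r ≠ [] := by simp [pvLines]
    cases t with
    | nil =>
      rw [List.map_cons, List.map_nil, List.flatten_cons, List.flatten_nil, List.append_nil,
        chunk_eq_join_lines, List.flatMap_cons, List.flatMap_nil, List.append_nil,
        pv_join_append ['\n'] (pvLines rules r) [[]] hlr (by simp), PySem.Chars.join_singleton]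
      simp
    | cons r' t' =>
      have ih' := ih (by simp)
      have hrest : ((r' :: t').flatMap fun x => pvLines rules x ++ [[]]) ≠ [] := by
        have : pvLines rules r' ≠ [] := by simp [pvLines]
        cases h : pvLines rules r' with
        | nil => exact absurd h this
        | cons c u => simp [List.flatMap_cons, h]
      have hsplit : List.flatMap (fun r => pvLines rules r ++ [[]]) (r :: r' :: t')
          = (pvLines rules r ++ [[]]) ++
            List.flatMap (fun r => pvLines rules r ++ [[]]) (r' :: t') := by
        rw [List.flatMap_cons]
      rw [List.map_cons, List.flatten_cons, chunk_eq_join_lines, ih', hsplit,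
        pv_join_append ['\n'] (pvLines rules r ++ [[]]) _ (by simp [hlr]) hrest,
        pv_join_append ['\n'] (pvLines rules r) [[]] hlr (by simp), PySem.Chars.join_singleton]
      simp

-- A's accumulator loop, named (same as before re-ordering)
theorem pv_foldA (rules : List (String × List (String × String))) (routes : List String)
    (acc : List (List Char)) :
    routes.foldl
      (fun blocks route =>
        if !(pvDictKeys rules).contains route then blocks
        else
          (PySem.List.sorted2 (pvDictItems (pvDictGet rules route)) (fun p => p.1) (fun p => p.2)).foldl
            (fun blocks hv =>
              let rendered_name :=
                PySem.Chars.join ['-'] ((PySem.Chars.splitOn hv.1.toList ['-']).map pvCapitalize)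
              blocks ++ [' ' :: ' ' :: (rendered_name ++ ':' :: ' ' :: hv.2.toList)])
            (blocks ++ [route.toList]) ++ [[]])
      acc
    = acc ++ (routes.filter (fun r => (pvDictKeys rules).contains r)).flatMap
        (fun r => pvLines rules r ++ [[]]) := by
  induction routes generalizing acc with
  | nil => simp
  | cons r t ih =>
    by_cases h : (pvDictKeys rules).contains r = true
    · rw [List.foldl_cons, if_neg (by rw [h]; decide), ih, List.filter_cons_of_pos h]
      simp only [PySem.List.foldl_append_singleton_eq_map]
      simp [pvLines]
      congr 1
      refine List.filter_congr ?_
      intro x _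
      simp [List.contains_eq_mem]
    · rw [Bool.not_eq_true] at h
      rw [List.foldl_cons, if_pos (by rw [h]; decide), ih,
        List.filter_cons_of_neg (by rw [h]; decide)]

theorem pv_extra_filter (rules : List (String × List (String × String))) :
    (PySem.List.sorted ((pvDictKeys rules).filter (fun r => !HEADER_ROUTE_ORDER.contains r))
        (fun r => r)).filter (fun r => (pvDictKeys rules).contains r)
    = PySem.List.sorted ((pvDictKeys rules).filter (fun r => !HEADER_ROUTE_ORDER.contains r))
        (fun r => r) := by
  apply List.filter_eq_self.2
  intro r hr
  rw [PySem.List.mem_sorted] at hr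
  have hm := List.mem_of_mem_filter hr
  exact List.elem_eq_true_of_mem hm

-- B's accumulator loop: the streamed text is the flattened chunks
theorem pv_foldB (rules : List (String × List (String × String))) (routes : List String)
    (acc : List Char) :
    routes.foldl
      (fun text route =>
        let text := text ++ route.toList
        let text :=
          (PySem.List.sorted2 (pvDictItems (pvDictGet rules route)) (fun p => p.1) (fun p => p.2)).foldl
            (fun text nv =>
              text ++ ('\n' :: ' ' :: ' ' :: (pvCapScan nv.1.toList true ++ ':' :: ' ' :: nv.2.toList)))
            text
        text ++ ['\n', '\n'])
      acc
    = acc ++ (routes.map (pvChunk rules)).flatten := by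
  induction routes generalizing acc with
  | nil => simp
  | cons r t ih =>
    rw [List.foldl_cons, ih]
    simp only [PySem.List.foldl_append_eq_flatMap]
    simp [pvChunk, List.flatMap_def]

-- ===== VERDICT (by name: the statement is the Claim_ definition above) =====
theorem render_headers_manifest_spec : Claim_equal_render_headers_manifest := by
  intro rules _
  unfold Spec_render_headers_manifest
  have hnd : (pvDictKeys rules).Nodup := PySem.List.nodup_dedup _
  have horder :
      PySem.List.sorted2 (pvDictKeys rules)
          (fun r => PySem.Dict.getD
            ((PySem.List.enumerate HEADER_ROUTE_ORDER 0).foldl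
              (fun d p => PySem.Dict.insert d p.2 p.1) PySem.Dict.empty) r
            (HEADER_ROUTE_ORDER.length : Int))
          (fun r => r)
        = HEADER_ROUTE_ORDER.filter (fun r => (pvDictKeys rules).contains r) ++
          PySem.List.sorted ((pvDictKeys rules).filter (fun r => !HEADER_ROUTE_ORDER.contains r))
            (fun r => r) := by
    rw [sorted2_eq_sorted_lex]
    exact order_eq (pvDictKeys rules) hnd
  simp only [render_headers_manifest, render_headers_manifest_alt]
  rw [pv_foldA, pv_foldB, horder, List.nil_append, List.nil_append,
    List.filter_append, pv_extra_filter]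
  set rs := HEADER_ROUTE_ORDER.filter (fun r => (pvDictKeys rules).contains r) ++
      PySem.List.sorted ((pvDictKeys rules).filter (fun r => !HEADER_ROUTE_ORDER.contains r))
        (fun r => r) with hrs
  cases h : rs with
  | nil => rfl
  | cons r t =>
    rw [chunks_eq_joined rules (r :: t) (by simp), pv_rstrip_newline]
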